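-- pv_equiv track=rewrite | github.com/tinotendanyashanu/zimprep | backend/app/engines/question_delivery/rules/locking_rules.py | get_lockable_questions
-- ===== SOURCE A (Python) =====
-- from typing import List, Set
--
-- def get_lockable_questions(
--     current_index: int,
--     navigation_mode: str,
--     total_questions: int,
--     already_locked: List[int]
-- ) -> List[int]:
--     """Get questions that could be locked based on current state.
--
--     Args:
--         current_index: Current question index
--         navigation_mode: Navigation mode
--         total_questions: Total questions
--         already_locked: Already locked questions
--
--     Returns:
--         List of question indices that could be locked
--     """
--     locked_set = set(already_locked)
--     lockable = []
--
--     if navigation_mode == "forward_only":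
--         # All questions before current are lockable
--         for i in range(current_index):
--             if i not in locked_set:
--                 lockable.append(i)
--
--     # Section-based and free modes don't auto-lock
--     # (unless explicitly triggered by section transition)
--
--     return lockable
-- ===== SOURCE B (Python) =====
-- def get_lockable_questions(
--     current_index: int,
--     navigation_mode: str,
--     total_questions: int,
--     already_locked: list
-- ) -> list:
--     if navigation_mode != "forward_only":
--         return []
--     # Gap-walk: emit the complement of the locked indices inside [0, current_index)
--     # by extending whole unbroken runs between consecutive sorted locked indices,
--     # with no per-element membership test at all.
--     result = []
--     prev = 0
--     for k in sorted(set(already_locked)):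
--         if k >= current_index:
--             break
--         if k >= 0:
--             result.extend(range(prev, k))
--             prev = k + 1
--     result.extend(range(prev, current_index))
--     return result
-- ===== Notes on version B (the rewrite author's own statement) =====
-- stated objective: faster
-- what changed: Instead of scanning range(current_index) and testing each index against a locked set, B sorts the distinct locked indices and walks the gaps between consecutive locked values, emitting whole unlocked runs with extend(range(prev, k)) and no per-element membership test or per-element append.
import Mathlib
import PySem

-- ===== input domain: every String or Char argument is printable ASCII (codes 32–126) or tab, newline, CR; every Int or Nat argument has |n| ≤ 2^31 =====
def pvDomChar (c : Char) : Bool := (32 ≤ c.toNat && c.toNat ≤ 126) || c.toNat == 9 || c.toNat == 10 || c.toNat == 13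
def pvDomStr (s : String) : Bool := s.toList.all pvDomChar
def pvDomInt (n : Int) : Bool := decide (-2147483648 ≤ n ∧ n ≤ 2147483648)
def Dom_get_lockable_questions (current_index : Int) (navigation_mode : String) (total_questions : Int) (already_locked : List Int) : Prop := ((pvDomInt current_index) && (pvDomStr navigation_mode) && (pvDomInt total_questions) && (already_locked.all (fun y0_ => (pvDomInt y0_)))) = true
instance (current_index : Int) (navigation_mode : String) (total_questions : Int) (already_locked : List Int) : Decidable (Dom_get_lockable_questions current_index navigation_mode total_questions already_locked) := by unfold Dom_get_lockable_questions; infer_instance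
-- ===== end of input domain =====

-- B replaces A's per-element membership filter over range(current_index) by a gap-walk
-- over the sorted locked indices, extending whole unbroken runs between consecutive
-- locked values (alternative algorithm, no membership tests); equal return value proved below.

-- ===== PORT A =====
def get_lockable_questions (current_index : Int) (navigation_mode : String) (total_questions : Int) (already_locked : List Int) : List Int :=
  let locked_set := PySem.Set.ofList already_locked
  let lockable : List Int := []
  if navigation_mode == "forward_only" then
    (PySem.List.pyRange 0 current_index 1).foldl
      (fun acc i => if PySem.Set.contains locked_set i then acc else acc ++ [i]) lockable
  else
    lockable

-- ===== PORT B =====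
-- the 'for k in sorted(set(already_locked)): … break …' loop with its trailing extend
def altGo (ci : Int) : List Int → Int → List Int → List Int
  | [], prev, res => res ++ PySem.List.pyRange prev ci 1
  | k :: ks, prev, res =>
    if ci ≤ k then res ++ PySem.List.pyRange prev ci 1      -- break, then final extend
    else if 0 ≤ k then altGo ci ks (k + 1) (res ++ PySem.List.pyRange prev k 1)
    else altGo ci ks prev res

def get_lockable_questions_alt (current_index : Int) (navigation_mode : String) (total_questions : Int) (already_locked : List Int) : List Int :=
  if navigation_mode != "forward_only" then []
  else
    altGo current_index
      (PySem.List.sorted (PySem.Set.ofList already_locked) (fun x => x) false) 0 []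

-- ===== PRECONDITION & SPEC =====
def Spec_get_lockable_questions (current_index : Int) (navigation_mode : String) (total_questions : Int) (already_locked : List Int) (out : List Int) : Prop := out = get_lockable_questions_alt current_index navigation_mode total_questions already_locked
instance (current_index : Int) (navigation_mode : String) (total_questions : Int) (already_locked : List Int) (out : List Int) : Decidable (Spec_get_lockable_questions current_index navigation_mode total_questions already_locked out) := by unfold Spec_get_lockable_questions; infer_instance

-- ===== CLAIM =====
def Claim_equal_get_lockable_questions : Prop := ∀ (current_index : Int) (navigation_mode : String) (total_questions : Int) (already_locked : List Int), Dom_get_lockable_questions current_index navigation_mode total_questions already_locked → Spec_get_lockable_questions current_index navigation_mode total_questions already_locked (get_lockable_questions current_index navigation_mode total_questions already_locked)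

-- ===== LEMMAS AND PROOFS =====

-- A's loop 'if i in locked: skip else append' is a filter.
theorem foldl_skip_if (c : Int → Bool) (l : List Int) (acc : List Int) :
    l.foldl (fun acc i => if c i then acc else acc ++ [i]) acc
      = acc ++ l.filter (fun i => !(c i)) := by
  induction l generalizing acc with
  | nil => simp
  | cons x xs ih =>
    by_cases h : c x = true <;>
      simp [List.foldl_cons, h, ih, List.append_assoc]

-- The gap-walk over a strictly increasing locked list produces exactly the
-- membership-filtered range.
theorem altGo_eq (ci : Int) (ks : List Int) :
    ks.Pairwise (· < ·) →
    ∀ (prev : Int) (res : List Int), 0 ≤ prev → (∀ x ∈ ks, x < 0 ∨ prev ≤ x) →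
    altGo ci ks prev res
      = res ++ (PySem.List.pyRange prev ci 1).filter (fun i => !(ks.contains i)) := by
  induction ks with
  | nil =>
    intro _ prev res _ _
    simp [altGo]
  | cons k ks ih =>
    intro hpw prev res hprev hinv
    have hk : ∀ x ∈ ks, k < x := fun x hx => (List.pairwise_cons.mp hpw).1 x hx
    have hpw' : ks.Pairwise (· < ·) := (List.pairwise_cons.mp hpw).2
    by_cases hci : ci ≤ k
    · -- break: no element of k :: ks falls inside [prev, ci)
      have hfull : (PySem.List.pyRange prev ci 1).filter (fun i => !((k :: ks).contains i))
          = PySem.List.pyRange prev ci 1 := by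
        apply List.filter_eq_self.mpr
        intro i hi
        have hib := (PySem.List.mem_pyRange_one.mp hi).2
        have hne : i ≠ k := by omega
        have hnm : i ∉ ks := fun hx => absurd (hk i hx) (by omega)
        simp [List.contains_eq_mem, hne, hnm]
      rw [altGo, if_pos hci, hfull]
    · by_cases hk0 : 0 ≤ k
      · -- consume k: prev ≤ k < ci
        have hpk : prev ≤ k := by
          rcases hinv k List.mem_cons_self with h | h
          · omega
          · exact h
        have hsplit : PySem.List.pyRange prev ci 1
            = PySem.List.pyRange prev k 1 ++ (k :: PySem.List.pyRange (k + 1) ci 1) := by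
          rw [PySem.List.pyRange_one_append prev k ci hpk (by omega),
              PySem.List.pyRange_one_cons (a := k) (b := ci) (by omega)]
        have hlow : (PySem.List.pyRange prev k 1).filter (fun i => !((k :: ks).contains i))
            = PySem.List.pyRange prev k 1 := by
          apply List.filter_eq_self.mpr
          intro i hi
          have hib := (PySem.List.mem_pyRange_one.mp hi).2
          have hne : i ≠ k := by omega
          have hnm : i ∉ ks := fun hx => absurd (hk i hx) (by omega)
          simp [List.contains_eq_mem, hne, hnm]
        have hhigh : (PySem.List.pyRange (k + 1) ci 1).filter (fun i => !((k :: ks).contains i))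
            = (PySem.List.pyRange (k + 1) ci 1).filter (fun i => !(ks.contains i)) := by
          apply List.filter_congr
          intro i hi
          have hia := (PySem.List.mem_pyRange_one.mp hi).1
          have hne : i ≠ k := by omega
          simp [List.contains_eq_mem, hne]
        have hcons : List.filter (fun i => !((k :: ks).contains i))
              (k :: PySem.List.pyRange (k + 1) ci 1)
            = List.filter (fun i => !((k :: ks).contains i))
              (PySem.List.pyRange (k + 1) ci 1) := by
          rw [List.filter_cons]
          simp [List.contains_eq_mem]
        rw [altGo, if_neg hci, if_pos hk0,
            ih hpw' (k + 1) (res ++ PySem.List.pyRange prev k 1) (by omega)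
              (fun x hx => Or.inr (by have := hk x hx; omega)),
            hsplit, List.filter_append, hlow, hcons, hhigh, List.append_assoc]
      · -- skip negative k: no element of [prev, ci) equals k
        have hfilt : (PySem.List.pyRange prev ci 1).filter (fun i => !((k :: ks).contains i))
            = (PySem.List.pyRange prev ci 1).filter (fun i => !(ks.contains i)) := by
          apply List.filter_congr
          intro i hi
          have hia := (PySem.List.mem_pyRange_one.mp hi).1
          have hne : i ≠ k := by omega
          simp [List.contains_eq_mem, hne]
        rw [altGo, if_neg hci, if_neg hk0,
            ih hpw' prev res hprev (fun x hx => hinv x (List.mem_cons_of_mem _ hx)),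
            hfilt]

theorem get_lockable_questions_spec : Claim_equal_get_lockable_questions := by
  unfold Claim_equal_get_lockable_questions
  intro ci nm tq locked _
  unfold Spec_get_lockable_questions get_lockable_questions get_lockable_questions_alt
  by_cases h : nm = "forward_only"
  · simp only [h, beq_self_eq_true, if_true, bne_self_eq_false, Bool.false_eq_true, if_false]
    rw [foldl_skip_if,
        altGo_eq ci _ (PySem.List.sorted_ofList_pairwise_lt locked) 0 [] le_rfl
          (fun x _ => by omega)]
    simp only [List.nil_append]
    apply List.filter_congr
    intro i _
    have hmem : ((PySem.List.sorted (PySem.Set.ofList locked) (fun x => x) false).contains i)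
        = (PySem.Set.contains (PySem.Set.ofList locked) i) := by
      simp [List.contains_eq_mem, PySem.Set.contains,
        (PySem.List.sorted_perm (PySem.Set.ofList locked) (fun x => x) false).mem_iff]
    rw [hmem]
  · simp [h]
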